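-- pv_equiv track=rewrite | github.com/cechendu-clip/n-queens-hill-climbing-project | updatedcode/heuristic.py | get_best_neighbors
-- ===== SOURCE A (Python) =====
-- from typing import List, Tuple
--
-- State = List[int]
--
-- def compute_heuristic(state: State)-> int:
--     """
--     [Slide 16: "The heuristic cost function h is the number of pairs of queens that are attacking each other, either directly or indirectly"]
--     Return h = number of pairs of queens that are attacking each other
--     h = 0 means no conflicts or goal state (solution found)
--     """
--     n = len(state)
--     h = 0
--     for i in range(n):
--         for j in range(i + 1, n):
--             if state[i] == state[j]: # same row
--                 h += 1
--             if abs(state[i] - state[j]) == abs(i - j): # same diagonal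
--                 h += 1
--     return h
--
-- def get_best_neighbors(state: State) -> Tuple[int, List[State]]:
--     """
--     [Slide 10 pseudocode: "neighbor <- a highest-valued successor of current"; since we minimize h, we pick the neighbor with the lowest h.]
--     Evaluate all n*(n-1) neighbors (move each queen within its column) and return the minimum heuristic value found together with all neighbor states that achieve that minimum.
--
--     Returns: (best_h, best_nbrs)
--         best_h: lowest h value among all neighbors
--         best_nbrs: list of neighbor states achieving best_h
--     """
--     n = len(state)
--     best_h = None
--     best_nbrs: List[State] = []
--
--     for col in range(n):
--         original_row = state[col]
--         for row in range(n):
--             if row == original_row: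
--                 continue # skip current position
--
--             neighbor = state.copy()
--             neighbor[col] = row
--             h = compute_heuristic(neighbor)
--
--             if best_h is None or h < best_h:
--                 best_h = h
--                 best_nbrs = [neighbor]
--             elif h == best_h:
--                 best_nbrs.append(neighbor)
--
--     # for n=1 there are no neighbors; treat the current state as already solved.
--     if best_h is None:
--         return compute_heuristic(state), [state.copy()]
--
--     return best_h, best_nbrs
-- ===== SOURCE B (Python) =====
-- from typing import List, Tuple
--
-- State = List[int]
--
-- def get_best_neighbors(state: State) -> Tuple[int, List[State]]:
--     """Counter-based exact rewrite.  Row and both-diagonal occupancy counters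
--     give each cell's conflict count in O(1); the base heuristic is half the
--     sum of per-queen conflict counts, and every neighbor's heuristic is
--     h0 - old_cell_conflicts + new_cell_conflicts.  The best neighbors are
--     then a min over the candidate list followed by a filter."""
--     n = len(state)
--     rows = {}
--     d1 = {}
--     d2 = {}
--     for j, r in enumerate(state):
--         rows[r] = rows.get(r, 0) + 1
--     for j, r in enumerate(state):
--         d1[r - j] = d1.get(r - j, 0) + 1
--     for j, r in enumerate(state):
--         d2[r + j] = d2.get(r + j, 0) + 1
--
--     def hits(col, r):
--         return rows.get(r, 0) + d1.get(r - col, 0) + d2.get(r + col, 0)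
--
--     total = 0
--     for j, r in enumerate(state):
--         total += hits(j, r)
--     h0 = (total - 3 * n) // 2
--
--     cand = [
--         (h0 - (hits(col, state[col]) - 3) + hits(col, row),
--          state[:col] + [row] + state[col + 1:])
--         for col in range(n)
--         for row in range(n)
--         if row != state[col]
--     ]
--     if not cand:
--         return h0, [state.copy()]
--     best = min(h for h, _ in cand)
--     return best, [nb for h, nb in cand if h == best]
-- ===== Notes on version B (the rewrite author's own statement) =====
-- stated objective: faster
-- what changed: B builds row/diagonal occupancy counters once, reads each cell's conflict count off them in O(1) (base heuristic = half the summed per-queen conflicts), lists all neighbor candidates with their incrementally-derived heuristic, and picks winners by min-then-filter, instead of A's full O(n^2) pair recount per neighbor inside a running-best loop.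
import Mathlib
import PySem

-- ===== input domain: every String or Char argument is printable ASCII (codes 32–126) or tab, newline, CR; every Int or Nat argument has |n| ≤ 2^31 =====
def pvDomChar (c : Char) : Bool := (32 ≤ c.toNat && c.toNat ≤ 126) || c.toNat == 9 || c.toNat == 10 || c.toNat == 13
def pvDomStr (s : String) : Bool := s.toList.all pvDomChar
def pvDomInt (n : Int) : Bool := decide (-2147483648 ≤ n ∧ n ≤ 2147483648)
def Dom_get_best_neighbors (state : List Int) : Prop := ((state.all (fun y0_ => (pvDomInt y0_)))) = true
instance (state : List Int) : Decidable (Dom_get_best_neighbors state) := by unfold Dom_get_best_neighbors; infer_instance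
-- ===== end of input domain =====

-- B replaces the per-neighbor O(n^2) pair count by row/diagonal occupancy counters (each
-- neighbor's heuristic is derived in O(1) from them) and picks the winners by min-then-filter.

-- ===== PORT A =====
-- helper compute_heuristic: the nested pair loop of Source A
def compute_heuristic (state : List Int) : Int :=
  let n : Int := state.length
  (PySem.List.pyRange 0 n 1).foldl (fun h i =>
    (PySem.List.pyRange (i + 1) n 1).foldl (fun h j =>
      let h := if PySem.List.pyGetD state i 0 = PySem.List.pyGetD state j 0 then h + 1 else h
      if |PySem.List.pyGetD state i 0 - PySem.List.pyGetD state j 0| = |i - j| then h + 1 else h)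
      h) 0

def get_best_neighbors (state : List Int) : Int × List (List Int) :=
  let n : Int := state.length
  let acc :=
    (PySem.List.pyRange 0 n 1).foldl (fun (acc : Option Int × List (List Int)) col =>
      let original_row := PySem.List.pyGetD state col 0
      (PySem.List.pyRange 0 n 1).foldl (fun acc row =>
        if row = original_row then acc
        else
          let neighbor := PySem.List.pySetD state col row
          let h := compute_heuristic neighbor
          match acc.1 with
          | none => (some h, [neighbor])
          | some bh =>
            if h < bh then (some h, [neighbor])
            else if h = bh then (some bh, acc.2 ++ [neighbor])
            else acc) acc) ((none : Option Int), ([] : List (List Int)))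
  match acc.1 with
  | none => (compute_heuristic state, [state])
  | some bh => (bh, acc.2)

-- ===== PORT B =====
-- Source B's three counter dicts (rows[r] = rows.get(r, 0) + 1 over enumerate(state), etc.)
def pvRows (state : List Int) : PySem.Dict Int Int :=
  (PySem.List.enumerate state).foldl (fun d p => d.modify p.2 0 (· + 1)) PySem.Dict.empty

def pvD1 (state : List Int) : PySem.Dict Int Int :=
  (PySem.List.enumerate state).foldl (fun d p => d.modify (p.2 - p.1) 0 (· + 1)) PySem.Dict.empty

def pvD2 (state : List Int) : PySem.Dict Int Int :=
  (PySem.List.enumerate state).foldl (fun d p => d.modify (p.2 + p.1) 0 (· + 1)) PySem.Dict.empty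

-- Source B's hits(col, r): conflict relations of cell (col, r) read off the three counters
def pvHits (rows d1 d2 : PySem.Dict Int Int) (col r : Int) : Int :=
  rows.getD r 0 + d1.getD (r - col) 0 + d2.getD (r + col) 0

def get_best_neighbors_alt (state : List Int) : Int × List (List Int) :=
  let n : Int := state.length
  let rows := pvRows state
  let d1 := pvD1 state
  let d2 := pvD2 state
  let total :=
    (PySem.List.enumerate state).foldl (fun t p => t + pvHits rows d1 d2 p.1 p.2) 0
  let h0 := PySem.Int.floordiv (total - 3 * n) 2
  let cand : List (Int × List Int) :=
    (PySem.List.pyRange 0 n 1).flatMap (fun col =>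
      ((PySem.List.pyRange 0 n 1).filter (fun row => row != PySem.List.pyGetD state col 0)).map
        (fun row =>
          (h0 - (pvHits rows d1 d2 col (PySem.List.pyGetD state col 0) - 3)
             + pvHits rows d1 d2 col row,
           PySem.List.slice state none (some col) ++ [row]
             ++ PySem.List.slice state (some (col + 1)) none)))
  -- `if not cand: return h0, [state.copy()]`; min? is none exactly on the empty candidate list
  match PySem.List.min? (cand.map Prod.fst) (fun x => x) with
  | none => (h0, [state])
  | some best => (best, (cand.filter (fun p => p.1 == best)).map Prod.snd)

-- ===== PRECONDITION & SPEC =====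
def Spec_get_best_neighbors (state : List Int) (out : Int × List (List Int)) : Prop := out = get_best_neighbors_alt state
instance (state : List Int) (out : Int × List (List Int)) : Decidable (Spec_get_best_neighbors state out) := by unfold Spec_get_best_neighbors; infer_instance

-- ===== CLAIM (what is proved, stated in full; the proofs are below) =====
def Claim_equal_get_best_neighbors : Prop := ∀ (state : List Int), Dom_get_best_neighbors state → Spec_get_best_neighbors state (get_best_neighbors state)

-- ===== LEMMAS AND PROOFS =====

-- one pair's contribution to the heuristic
def pvC (i : Nat) (a : Int) (j : Nat) (b : Int) : Int :=
  (if a = b then 1 else 0) + (if |a - b| = |(i : Int) - (j : Int)| then 1 else 0)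

-- heuristic of a board given as f : position -> row
def pvH (n : Nat) (f : Nat → Int) : Int :=
  ∑ i ∈ Finset.range n, ∑ j ∈ Finset.Ico (i + 1) n, pvC i (f i) j (f j)

-- conflicts of a hypothetical queen at (col, x) against the queens of f other than col
def pvT (n col : Nat) (f : Nat → Int) (x : Int) : Int :=
  ∑ j ∈ Finset.range n, if j = col then 0 else pvC col x j (f j)

lemma pvC_sym (i : Nat) (a : Int) (j : Nat) (b : Int) : pvC i a j b = pvC j b i a := by
  simp [pvC, eq_comm, abs_sub_comm]

lemma pvH_succ (n : Nat) (f : Nat → Int) :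
    pvH (n + 1) f = pvH n f + ∑ i ∈ Finset.range n, pvC i (f i) n (f n) := by
  unfold pvH
  rw [Finset.sum_range_succ, Finset.Ico_self, Finset.sum_empty, add_zero, ← Finset.sum_add_distrib]
  apply Finset.sum_congr rfl
  intro i hi
  simp only [Finset.mem_range] at hi
  rw [Finset.sum_Ico_succ_top (by omega : i + 1 ≤ n)]

lemma pvT_succ (n col : Nat) (f : Nat → Int) (x : Int) :
    pvT (n + 1) col f x = pvT n col f x + (if n = col then 0 else pvC col x n (f n)) := by
  simp [pvT, Finset.sum_range_succ]

lemma pvH_congr (n : Nat) (f g : Nat → Int) (h : ∀ i < n, f i = g i) : pvH n f = pvH n g := by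
  unfold pvH
  apply Finset.sum_congr rfl
  intro i hi
  apply Finset.sum_congr rfl
  intro j hj
  simp only [Finset.mem_range] at hi
  simp only [Finset.mem_Ico] at hj
  rw [h i hi, h j hj.2]

lemma pvDelta (n col : Nat) (hcol : col < n) (f : Nat → Int) (r : Int) :
    pvH n (Function.update f col r) = pvH n f - pvT n col f (f col) + pvT n col f r := by
  induction n with
  | zero => omega
  | succ n ih =>
    rw [pvH_succ, pvH_succ, pvT_succ, pvT_succ]
    rcases Nat.lt_succ_iff_lt_or_eq.mp hcol with h | h
    · -- col < n
      have hne : n ≠ col := by omega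
      have hupn : Function.update f col r n = f n := Function.update_of_ne hne r f
      have hmem : col ∈ Finset.range n := Finset.mem_range.mpr h
      have hsum :
          ∑ i ∈ Finset.range n, pvC i (Function.update f col r i) n (Function.update f col r n)
            = ∑ i ∈ Finset.range n, pvC i (f i) n (f n)
              - pvC col (f col) n (f n) + pvC col r n (f n) := by
        rw [hupn, Finset.sum_eq_sum_diff_singleton_add hmem
              (fun i => pvC i (Function.update f col r i) n (f n)),
            Finset.sum_eq_sum_diff_singleton_add hmem (fun i => pvC i (f i) n (f n))]
        have : ∑ i ∈ Finset.range n \ {col}, pvC i (Function.update f col r i) n (f n)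
            = ∑ i ∈ Finset.range n \ {col}, pvC i (f i) n (f n) := by
          apply Finset.sum_congr rfl
          intro i hi
          simp only [Finset.mem_sdiff, Finset.mem_singleton] at hi
          rw [Function.update_of_ne hi.2]
        rw [this, Function.update_self]
        ring
      rw [ih h, hsum]
      simp only [if_neg hne]
      ring
    · -- col = n
      subst h
      have h1 : pvH col (Function.update f col r) = pvH col f := by
        apply pvH_congr
        intro i hi
        exact Function.update_of_ne (by omega : i ≠ col) r f
      have h2 : ∑ i ∈ Finset.range col, pvC i (Function.update f col r i) col (Function.update f col r col)
          = ∑ i ∈ Finset.range col, pvC i (f i) col r := by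
        rw [Function.update_self]
        apply Finset.sum_congr rfl
        intro i hi
        simp only [Finset.mem_range] at hi
        rw [Function.update_of_ne (by omega : i ≠ col)]
      have h3 : ∀ x : Int, pvT col col f x = ∑ j ∈ Finset.range col, pvC j (f j) col x := by
        intro x
        unfold pvT
        apply Finset.sum_congr rfl
        intro j hj
        simp only [Finset.mem_range] at hj
        rw [if_neg (by omega), pvC_sym]
      have h4 : ∑ i ∈ Finset.range col, pvC i (f i) col (f col)
          = pvT col col f (f col) := (h3 _).symm
      rw [h1, h2, if_pos rfl, if_pos rfl, h3 r, ← h4]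
      ring

lemma pvSumRange (n : Nat) (g : Nat → Int) :
    (List.map g (List.range n)).sum = ∑ k ∈ Finset.range n, g k := rfl

lemma pvInner (s : List Int) (k : Nat) (hk : k < s.length) (h : Int) :
    (PySem.List.pyRange ((k : Int) + 1) (s.length : Int) 1).foldl (fun h j =>
      let h := if PySem.List.pyGetD s (k : Int) 0 = PySem.List.pyGetD s j 0 then h + 1 else h
      if |PySem.List.pyGetD s (k : Int) 0 - PySem.List.pyGetD s j 0| = |(k : Int) - j| then h + 1 else h)
      h
    = h + ∑ j ∈ Finset.Ico (k + 1) s.length, pvC k (s.getD k 0) j (s.getD j 0) := by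
  have hcast : ((k : Int) + 1) = ((k + 1 : Nat) : Int) := by push_cast; ring
  rw [hcast, PySem.List.pyRange_one, List.foldl_map]
  have htn : (((s.length : Int)) - ((k + 1 : Nat) : Int)).toNat = s.length - (k + 1) := by omega
  rw [htn]
  rw [PySem.List.foldl_congr_mem _ _
      (fun (h : Int) (m : Nat) => h + pvC k (s.getD k 0) (k + 1 + m) (s.getD (k + 1 + m) 0)) _ ?_]
  · rw [PySem.List.foldl_add, pvSumRange, Finset.sum_Ico_eq_sum_range]
  · intro acc m hm
    have hc : ((k + 1 : Nat) : Int) + (m : Int) = ((k + 1 + m : Nat) : Int) := by push_cast; ring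
    rw [hc, PySem.List.pyGetD_natCast, PySem.List.pyGetD_natCast]
    simp only [pvC]
    push_cast
    split_ifs <;> ring

lemma pvCH_eq (s : List Int) : compute_heuristic s = pvH s.length (fun i => s.getD i 0) := by
  unfold compute_heuristic pvH
  dsimp only
  rw [PySem.List.pyRange_zero_natCast, List.foldl_map]
  rw [PySem.List.foldl_congr_mem _ _
      (fun (h : Int) (k : Nat) => h + ∑ j ∈ Finset.Ico (k + 1) s.length, pvC k (s.getD k 0) j (s.getD j 0)) _ ?_]
  · rw [PySem.List.foldl_add, pvSumRange, zero_add]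
  · intro acc k hk
    simp only [List.mem_range] at hk
    exact pvInner s k hk acc

-- countP over an index range as a 0/1 integer sum
lemma pvCountP (n : Nat) (p : Nat → Bool) :
    (((List.range n).countP p : Nat) : Int) = ∑ j ∈ Finset.range n, (if p j then (1:Int) else 0) := by
  induction n with
  | zero => simp
  | succ n ih => rw [List.range_succ, Finset.sum_range_succ, ← ih]; simp [List.countP_append]

-- a map over enumerate(state) is a map over the index range
lemma pvEnumMap (s : List Int) (g : Int × Int → Int) :
    (PySem.List.enumerate s).map g
      = (List.range s.length).map (fun (k : Nat) => g ((k : Int), s.getD k 0)) := by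
  rw [PySem.List.enumerate_eq_map_pyRange s 0]
  have hlen : PySem.List.len s = ((s.length : Nat) : Int) := rfl
  rw [hlen, PySem.List.pyRange_zero_natCast, List.map_map, List.map_map]
  apply List.map_congr_left
  intro k _
  simp [PySem.List.pyGetD_natCast]

-- the three counters count key-values over the index range
lemma pvCounterSum (s : List Int) (g : Int × Int → Int) (v : Int) :
    (((PySem.List.enumerate s).foldl (fun d p => d.modify (g p) 0 (· + 1)) PySem.Dict.empty).getD v 0)
      = ∑ j ∈ Finset.range s.length, (if g ((j : Int), s.getD j 0) = v then (1:Int) else 0) := by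
  have h1 : (PySem.List.enumerate s).foldl (fun d p => d.modify (g p) 0 (· + 1)) PySem.Dict.empty
      = PySem.Dict.counter ((PySem.List.enumerate s).map g) := by
    rw [PySem.Dict.counter_eq_foldl, List.foldl_map]
  rw [h1, PySem.Dict.getD_counter, pvEnumMap, List.count_eq_countP, List.countP_map, pvCountP]
  apply Finset.sum_congr rfl
  intro j _
  simp [beq_iff_eq]

-- hits(col, x) = conflicts with the other queens + triple self-hit when (col, x) is the queen's own cell
lemma pvHits_eq (s : List Int) (col : Nat) (hcol : col < s.length) (x : Int) :
    pvHits (pvRows s) (pvD1 s) (pvD2 s) (col : Int) x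
      = pvT s.length col (fun i => s.getD i 0) x
        + (if s.getD col 0 = x then 3 else 0) := by
  unfold pvHits pvRows pvD1 pvD2
  rw [pvCounterSum s (fun p => p.2) x, pvCounterSum s (fun p => p.2 - p.1) (x - col),
      pvCounterSum s (fun p => p.2 + p.1) (x + col)]
  unfold pvT
  have hrepl : (if s.getD col 0 = x then (3:Int) else 0)
      = ∑ j ∈ Finset.range s.length, (if j = col then (if s.getD col 0 = x then (3:Int) else 0) else 0) := by
    rw [Finset.sum_ite_eq' (Finset.range s.length) col
        (fun _ => if s.getD col 0 = x then (3:Int) else 0)]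
    simp [Finset.mem_range.mpr hcol]
  rw [hrepl, ← Finset.sum_add_distrib, ← Finset.sum_add_distrib, ← Finset.sum_add_distrib]
  apply Finset.sum_congr rfl
  intro j _
  by_cases hj : j = col
  · subst hj
    split_ifs <;> omega
  · rw [if_neg hj, if_neg hj]
    have hji : (j : Int) ≠ (col : Int) := by exact_mod_cast hj
    simp only [pvC, add_zero]
    have habs : (|x - s.getD j 0| = |(col : Int) - (j : Int)|)
        ↔ (s.getD j 0 - (j : Int) = x - (col : Int) ∨ s.getD j 0 + (j : Int) = x + (col : Int)) := by
      rw [abs_eq_abs]; omega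
    simp only [habs]
    split_ifs <;> omega

-- summing per-queen conflicts counts every conflicting pair twice
lemma pvDouble (n : Nat) (f : Nat → Int) :
    ∑ j ∈ Finset.range n, pvT n j f (f j) = 2 * pvH n f := by
  induction n with
  | zero => simp [pvH]
  | succ n ih =>
    rw [Finset.sum_range_succ, pvH_succ]
    have hlast : pvT (n + 1) n f (f n) = ∑ j ∈ Finset.range n, pvC j (f j) n (f n) := by
      rw [pvT_succ, if_pos rfl, add_zero]
      unfold pvT
      apply Finset.sum_congr rfl
      intro j hj
      simp only [Finset.mem_range] at hj
      rw [if_neg (by omega), pvC_sym]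
    have hpref : ∑ j ∈ Finset.range n, pvT (n + 1) j f (f j)
        = ∑ j ∈ Finset.range n, pvT n j f (f j)
          + ∑ j ∈ Finset.range n, pvC j (f j) n (f n) := by
      rw [← Finset.sum_add_distrib]
      apply Finset.sum_congr rfl
      intro j hj
      simp only [Finset.mem_range] at hj
      rw [pvT_succ, if_neg (by omega)]
    rw [hpref, hlast, ih]
    ring

-- Source B's `total` loop: the summed hits are twice the base heuristic plus 3n
lemma pvTotal (s : List Int) :
    (PySem.List.enumerate s).foldl
        (fun t p => t + pvHits (pvRows s) (pvD1 s) (pvD2 s) p.1 p.2) 0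
      = 2 * pvH s.length (fun i => s.getD i 0) + 3 * (s.length : Int) := by
  rw [PySem.List.foldl_add, pvEnumMap s (fun p => pvHits (pvRows s) (pvD1 s) (pvD2 s) p.1 p.2),
      pvSumRange, zero_add]
  have h1 : ∀ k ∈ Finset.range s.length,
      pvHits (pvRows s) (pvD1 s) (pvD2 s) (k : Int) (s.getD k 0)
        = pvT s.length k (fun i => s.getD i 0) (s.getD k 0) + 3 := by
    intro k hk
    rw [pvHits_eq s k (Finset.mem_range.mp hk), if_pos rfl]
  rw [Finset.sum_congr rfl h1, Finset.sum_add_distrib, pvDouble]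
  simp [mul_comm]

-- Source B's h0 is the base heuristic
lemma pvH0 (s : List Int) :
    PySem.Int.floordiv
        ((PySem.List.enumerate s).foldl
            (fun t p => t + pvHits (pvRows s) (pvD1 s) (pvD2 s) p.1 p.2) 0
          - 3 * (s.length : Int)) 2
      = pvH s.length (fun i => s.getD i 0) := by
  rw [pvTotal]
  have h2 : 2 * pvH s.length (fun i => s.getD i 0) + 3 * (s.length : Int) - 3 * (s.length : Int)
      = 2 * pvH s.length (fun i => s.getD i 0) := by ring
  rw [h2, PySem.Int.floordiv_eq_ediv_of_pos (by omega)]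
  exact Int.mul_ediv_cancel_left _ (by omega)

-- A's running best/ties accumulator step, named
def pvSel (acc : Option Int × List (List Int)) (c : Int × List Int) :
    Option Int × List (List Int) :=
  match acc.1 with
  | none => (some c.1, [c.2])
  | some bh =>
    if c.1 < bh then (some c.1, [c.2])
    else if c.1 = bh then (some bh, acc.2 ++ [c.2])
    else acc

-- A's selection fold is "running min + all ties in order"
lemma pvSelGen (l : List (Int × List Int)) (b : Int) (bl : List (List Int)) :
    l.foldl pvSel (some b, bl)
      = (some (l.foldl (fun a c => min a c.1) b),
         (if l.foldl (fun a c => min a c.1) b = b then bl else [])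
           ++ (l.filter (fun c => c.1 == l.foldl (fun a c => min a c.1) b)).map Prod.snd) := by
  induction l generalizing b bl with
  | nil => simp
  | cons c t ih =>
    have hMle : ∀ (a : Int), t.foldl (fun a c => min a c.1) a ≤ a := by
      intro a
      have := (PySem.List.foldl_min_le (t.map Prod.fst) a).1
      rwa [List.foldl_map] at this
    simp only [List.foldl_cons, List.filter_cons]
    by_cases h1 : c.1 < b
    · have hsel : pvSel (some b, bl) c = (some c.1, [c.2]) := by
        simp [pvSel, h1]
      have hmin : min b c.1 = c.1 := by omega
      rw [hsel, ih]
      simp only [hmin]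
      have hMb : ¬ List.foldl (fun a c => min a c.1) c.1 t = b := by
        have := hMle c.1; omega
      rw [if_neg hMb]
      by_cases h2 : List.foldl (fun a c => min a c.1) c.1 t = c.1
      · simp [h2]
      · have hq : ¬ c.1 = List.foldl (fun a c => min a c.1) c.1 t := by omega
        simp [h2, hq]
    · by_cases h2 : c.1 = b
      · have hsel : pvSel (some b, bl) c = (some b, bl ++ [c.2]) := by
          simp [pvSel, h2]
        have hmin : min b c.1 = b := by omega
        rw [hsel, ih]
        simp only [hmin]
        by_cases h3 : List.foldl (fun a c => min a c.1) b t = b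
        · simp [h3, h2]
        · have hq : ¬ c.1 = List.foldl (fun a c => min a c.1) b t := by omega
          simp [h3, hq]
      · have hsel : pvSel (some b, bl) c = (some b, bl) := by
          simp [pvSel, h1, h2]
        have hmin : min b c.1 = b := by omega
        rw [hsel, ih]
        simp only [hmin]
        have hM := hMle b
        have hq : ¬ c.1 = List.foldl (fun a c => min a c.1) b t := by omega
        simp [hq]

-- per-candidate agreement: B's O(1) heuristic and sliced neighbor are A's
lemma pvCand (s : List Int) (col row : Int) (hc0 : 0 ≤ col) (hcn : col < (s.length : Int))
    (hrow : ¬ row = PySem.List.pyGetD s col 0) :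
    (PySem.Int.floordiv
        ((PySem.List.enumerate s).foldl
            (fun t p => t + pvHits (pvRows s) (pvD1 s) (pvD2 s) p.1 p.2) 0
          - 3 * (s.length : Int)) 2
        - (pvHits (pvRows s) (pvD1 s) (pvD2 s) col (PySem.List.pyGetD s col 0) - 3)
        + pvHits (pvRows s) (pvD1 s) (pvD2 s) col row,
      PySem.List.slice s none (some col) ++ [row] ++ PySem.List.slice s (some (col + 1)) none)
    = (compute_heuristic (PySem.List.pySetD s col row), PySem.List.pySetD s col row) := by
  obtain ⟨c, rfl⟩ : ∃ c : Nat, col = (c : Int) := ⟨col.toNat, by omega⟩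
  have hlt : c < s.length := by omega
  have hset : PySem.List.pySetD s (c : Int) row = s.set c row := by
    rw [PySem.List.pySetD_of_nonneg s row hc0]
    simp
  simp only [PySem.List.pyGetD_natCast] at hrow ⊢
  refine Prod.ext ?_ ?_
  · -- the heuristic component
    show _ = compute_heuristic (PySem.List.pySetD s (c : Int) row)
    rw [pvH0, hset]
    have hCH : compute_heuristic (s.set c row)
        = pvH s.length (fun i => s.getD i 0)
          - pvT s.length c (fun i => s.getD i 0) (s.getD c 0)
          + pvT s.length c (fun i => s.getD i 0) row := by
      rw [pvCH_eq]
      have hl : (s.set c row).length = s.length := List.length_set ..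
      rw [hl]
      have hfun : pvH s.length (fun i => (s.set c row).getD i 0)
          = pvH s.length (Function.update (fun i => s.getD i 0) c row) := by
        apply pvH_congr
        intro i hi
        rw [List.getD_eq_getElem _ _ (by simpa using hi), List.getElem_set,
            Function.update_apply]
        by_cases hic : i = c
        · simp [hic]
        · rw [if_neg (fun e => hic e.symm), if_neg hic, List.getD_eq_getElem _ _ hi]
      rw [hfun, pvDelta s.length c hlt (fun i => s.getD i 0) row]
    rw [hCH]
    have e1 : pvHits (pvRows s) (pvD1 s) (pvD2 s) (c : Int) (s.getD c 0)
        = pvT s.length c (fun i => s.getD i 0) (s.getD c 0) + 3 := by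
      rw [pvHits_eq s c hlt, if_pos rfl]
    have e2 : pvHits (pvRows s) (pvD1 s) (pvD2 s) (c : Int) row
        = pvT s.length c (fun i => s.getD i 0) row := by
      rw [pvHits_eq s c hlt, if_neg (fun e => hrow e.symm), add_zero]
    rw [e1, e2]
    ring
  · -- the neighbor component
    show _ = PySem.List.pySetD s (c : Int) row
    rw [hset, PySem.List.slice_to_natCast,
        show ((c : Int) + 1) = ((c + 1 : Nat) : Int) from by push_cast; ring,
        PySem.List.slice_from_natCast,
        List.set_eq_take_cons_drop row hlt]
    simp

-- ===== VERDICT (by name: the statement is the Claim_ definition above) =====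
lemma pvMain (s : List Int) : get_best_neighbors s = get_best_neighbors_alt s := by
  unfold get_best_neighbors get_best_neighbors_alt
  dsimp only
  -- the candidate list both programs range over (already in B's shape)
  set cand : List (Int × List Int) :=
    (PySem.List.pyRange 0 (s.length : Int) 1).flatMap (fun col =>
      ((PySem.List.pyRange 0 (s.length : Int) 1).filter
          (fun row => row != PySem.List.pyGetD s col 0)).map
        (fun row =>
          (PySem.Int.floordiv
              ((PySem.List.enumerate s).foldl
                  (fun t p => t + pvHits (pvRows s) (pvD1 s) (pvD2 s) p.1 p.2) 0
                - 3 * (s.length : Int)) 2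
            - (pvHits (pvRows s) (pvD1 s) (pvD2 s) col (PySem.List.pyGetD s col 0) - 3)
            + pvHits (pvRows s) (pvD1 s) (pvD2 s) col row,
           PySem.List.slice s none (some col) ++ [row]
             ++ PySem.List.slice s (some (col + 1)) none))) with hcand
  -- Step 1: A's nested fold is the selection fold over cand
  have hA :
      (PySem.List.pyRange 0 (s.length : Int) 1).foldl
          (fun (acc : Option Int × List (List Int)) col =>
            (PySem.List.pyRange 0 (s.length : Int) 1).foldl (fun acc row =>
              if row = PySem.List.pyGetD s col 0 then acc
              else
                let neighbor := PySem.List.pySetD s col row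
                let h := compute_heuristic neighbor
                match acc.1 with
                | none => (some h, [neighbor])
                | some bh =>
                  if h < bh then (some h, [neighbor])
                  else if h = bh then (some bh, acc.2 ++ [neighbor])
                  else acc) acc)
          ((none : Option Int), ([] : List (List Int)))
        = cand.foldl pvSel ((none : Option Int), ([] : List (List Int))) := by
    rw [hcand, List.foldl_flatMap]
    apply PySem.List.foldl_congr_mem
    intro acc col hcol
    rw [PySem.List.mem_pyRange_one] at hcol
    rw [List.foldl_map]
    rw [PySem.List.foldl_congr_mem _ _
        (fun (acc : Option Int × List (List Int)) row =>
          if (row != PySem.List.pyGetD s col 0) = true then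
            pvSel acc (compute_heuristic (PySem.List.pySetD s col row),
              PySem.List.pySetD s col row)
          else acc) _ ?_]
    · rw [PySem.List.foldl_ite_eq_foldl_filter
          (fun row => (row != PySem.List.pyGetD s col 0) = true)]
      have hfil : (PySem.List.pyRange 0 (s.length : Int) 1).filter
            (fun row => decide ((row != PySem.List.pyGetD s col 0) = true))
          = (PySem.List.pyRange 0 (s.length : Int) 1).filter
            (fun row => row != PySem.List.pyGetD s col 0) := by
        apply List.filter_congr
        intro row _
        exact Bool.decide_coe (row != PySem.List.pyGetD s col 0)
      rw [hfil]
      apply PySem.List.foldl_congr_mem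
      intro acc2 row hrow
      rw [List.mem_filter] at hrow
      have hrow' : ¬ row = PySem.List.pyGetD s col 0 := by simpa [bne] using hrow.2
      have hcmem := hrow.1
      rw [PySem.List.mem_pyRange_one] at hcmem
      rw [pvCand s col row hcol.1 hcol.2 hrow']
    · intro acc2 row _
      dsimp only
      by_cases h : row = PySem.List.pyGetD s col 0
      · rw [if_pos h, if_neg (by simp [bne, h])]
      · have hb : (row != PySem.List.pyGetD s col 0) = true := by simp [bne, h]
        rw [if_neg h, if_pos hb]
        rfl
  rw [hA]
  -- Step 2: the selection fold is min-then-filter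
  cases hc : cand with
  | nil =>
    simp only [List.foldl_nil, List.map_nil]
    have hmin : PySem.List.min? ([] : List Int) (fun x => x) = none := by
      simp [PySem.List.min?_eq_none_iff]
    rw [hmin]
    rw [pvCH_eq, ← pvH0]
  | cons c t =>
    simp only [List.foldl_cons, List.map_cons]
    have hsel0 : pvSel ((none : Option Int), ([] : List (List Int))) c = (some c.1, [c.2]) := by
      simp [pvSel]
    rw [hsel0, pvSelGen]
    rw [PySem.List.min?_id_cons]
    have hM : (t.map Prod.fst).foldl min c.1 = t.foldl (fun a c => min a c.1) c.1 := by
      rw [List.foldl_map]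
    rw [hM]
    simp only [List.filter_cons]
    by_cases h1 : t.foldl (fun a c => min a c.1) c.1 = c.1
    · rw [if_pos h1, if_pos (by simpa [beq_iff_eq] using h1.symm)]
      simp
    · rw [if_neg h1, if_neg (by simpa [beq_iff_eq] using fun h => h1 h.symm)]
      simp

theorem get_best_neighbors_spec : Claim_equal_get_best_neighbors := by
  intro s _
  unfold Spec_get_best_neighbors
  exact pvMain s
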